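-- pv_equiv track=rewrite | github.com/khainacs/CS6001 | src/new_year_chaos.py | minimumBribes
-- ===== SOURCE A (Python) =====
-- def minimumBribes(q):
--     total = 0
--     for index in range(len(q) - 1, -1, -1):
--         if (q[index] - (index + 1)) > 2:
--             return "Too chaotic"
--         for index_j in range(max(0, q[index] - 2), index):
--             if q[index_j] > q[index]:
--                 total += 1
--     return total
-- ===== SOURCE B (Python) =====
-- def minimumBribes(q):
--     # one forward pass for the chaos check, then count inversions by merge sort
--     for i, v in enumerate(q):
--         if v - (i + 1) > 2:
--             return "Too chaotic"
--
--     def sort_count(a):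
--         if len(a) <= 1:
--             return a, 0
--         m = len(a) // 2
--         left, cl = sort_count(a[:m])
--         right, cr = sort_count(a[m:])
--         merged = []
--         inv = cl + cr
--         i = j = 0
--         while i < len(left) and j < len(right):
--             if left[i] <= right[j]:
--                 merged.append(left[i])
--                 i += 1
--             else:
--                 merged.append(right[j])
--                 j += 1
--                 inv += len(left) - i
--         merged.extend(left[i:])
--         merged.extend(right[j:])
--         return merged, inv
--
--     return sort_count(q)[1]
-- ===== Notes on version B (the rewrite author's own statement) =====
-- stated objective: faster
-- what changed: Replaces A's backward scan with per-element bounded window re-scans by a single forward chaos check followed by a merge-sort inversion count (valid because, when no element is more than 2 ahead of its position, every inversion lies inside A's window).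
-- outside the precondition, e.g. on minimumBribes([1, 5, 2, 3, 4]): A returns 'Too chaotic', B returns 'Too chaotic'
import Mathlib
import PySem

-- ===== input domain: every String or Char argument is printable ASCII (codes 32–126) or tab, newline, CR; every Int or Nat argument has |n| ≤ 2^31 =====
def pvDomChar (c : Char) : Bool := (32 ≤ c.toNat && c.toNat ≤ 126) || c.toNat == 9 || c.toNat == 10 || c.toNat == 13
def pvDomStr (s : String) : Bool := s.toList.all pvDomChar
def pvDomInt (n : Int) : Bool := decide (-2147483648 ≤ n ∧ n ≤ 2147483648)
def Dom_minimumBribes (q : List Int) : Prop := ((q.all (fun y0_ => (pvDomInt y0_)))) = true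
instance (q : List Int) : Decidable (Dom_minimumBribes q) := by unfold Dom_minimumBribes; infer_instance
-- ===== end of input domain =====

-- B replaces A's backward scan with a bounded window re-scan per element by one forward
-- chaos check followed by a merge-sort inversion count.

-- ===== PORT A =====
-- outer loop 'for index in range(len(q)-1, -1, -1)' as a structural countdown on the index;
-- the inner 'for index_j in range(max(0, q[index]-2), index)' threads the same running 'total'.
-- Where Python returns the STRING "Too chaotic" (not an Int, outside Pre_) the port returns -1.
def pvAOuter (q : List Int) : Nat → Int → Int
  | 0, total => total
  | k + 1, total =>
    let v := PySem.List.pyGetD q (k : Int) 0          -- q[index], index always in range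
    if v - ((k : Int) + 1) > 2 then -1                -- Python: return "Too chaotic"
    else
      pvAOuter q k
        ((PySem.List.pyRange (max 0 (v - 2)) (k : Int) 1).foldl
          (fun total j => if PySem.List.pyGetD q j 0 > v then total + 1 else total) total)

def minimumBribes (q : List Int) : Int := pvAOuter q q.length 0

-- ===== PORT B =====
-- chaos pre-pass 'for i, v in enumerate(q)' with early return
def pvBChaos : Nat → List Int → Bool
  | _, [] => false
  | i, v :: rest => if v - ((i : Int) + 1) > 2 then true else pvBChaos (i + 1) rest

-- the merge loop: pick the smaller head; taking from the right adds len(left)-i inversions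
def pvMerge : List Int → List Int → List Int × Int
  | [], right => (right, 0)
  | x :: l, [] => (x :: l, 0)
  | x :: l, y :: r =>
    if x ≤ y then
      let p := pvMerge l (y :: r)
      (x :: p.1, p.2)
    else
      let p := pvMerge (x :: l) r
      (y :: p.1, p.2 + ((x :: l).length : Int))
termination_by l r => l.length + r.length

-- sort_count: split at the middle, recurse, merge counting cross inversions
def pvSortCount (a : List Int) : List Int × Int :=
  if _h : a.length ≤ 1 then (a, 0)
  else
    let m := a.length / 2
    let pl := pvSortCount (a.take m)
    let pr := pvSortCount (a.drop m)
    let pm := pvMerge pl.1 pr.1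
    (pm.1, pl.2 + pr.2 + pm.2)
termination_by a.length
decreasing_by
  · simp [List.length_take]; omega
  · simp [List.length_drop]; omega

def minimumBribes_alt (q : List Int) : Int :=
  if pvBChaos 0 q then -1 else (pvSortCount q).2      -- Python: "Too chaotic" / sort_count(q)[1]

-- ===== PRECONDITION & SPEC =====
-- Pre_ excludes exactly the inputs on which A returns the STRING "Too chaotic" (not an Int);
-- B returns the same string there.
def Pre_minimumBribes (q : List Int) : Prop :=
  ∀ i < q.length, q.getD i 0 - ((i : Int) + 1) ≤ 2
instance (q : List Int) : Decidable (Pre_minimumBribes q) := by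
  unfold Pre_minimumBribes; infer_instance

def pvWitness_minimumBribes : List Int := [2, 1, 5, 3, 4]

def Spec_minimumBribes (q : List Int) (out : Int) : Prop := out = minimumBribes_alt q
instance (q : List Int) (out : Int) : Decidable (Spec_minimumBribes q out) := by
  unfold Spec_minimumBribes; infer_instance

-- ===== CLAIM (what is proved, stated in full; the proofs are below) =====
def Claim_equal_minimumBribes : Prop :=
  ∀ (q : List Int), Dom_minimumBribes q → Pre_minimumBribes q →
    Spec_minimumBribes q (minimumBribes q)

-- ===== LEMMAS AND PROOFS =====

-- the common yardstick: the number of inversions, head-recursively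
def pvInv : List Int → Int
  | [] => 0
  | x :: xs => ((xs.countP (fun y => decide (y < x)) : Nat) : Int) + pvInv xs

-- cross-inversion count between two blocks, grouped by right resp. left element
def pvCross (l r : List Int) : Int :=
  (r.map (fun y => ((l.countP (fun x => decide (y < x)) : Nat) : Int))).sum
def pvCrossD (l r : List Int) : Int :=
  (l.map (fun x => ((r.countP (fun y => decide (y < x)) : Nat) : Int))).sum

lemma pvCross_eq_pvCrossD (l r : List Int) : pvCross l r = pvCrossD l r := by
  induction l with
  | nil => simp [pvCross, pvCrossD]
  | cons x l ih =>
    simp only [pvCross, pvCrossD, List.map_cons, List.sum_cons] at *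
    have : (r.map (fun y => (((x :: l).countP (fun z => decide (y < z)) : Nat) : Int))).sum
        = (r.map (fun y => ((l.countP (fun z => decide (y < z)) : Nat) : Int)
            + (if decide (y < x) = true then (1:Int) else 0))).sum := by
      congr 1
      apply List.map_congr_left
      intro y _
      rw [List.countP_cons]
      push_cast
      by_cases h : y < x <;> simp [h]
    rw [this, PySem.List.sum_map_add_int, PySem.List.sum_map_ite_one_zero]
    omega

lemma pvInv_append (l r : List Int) :
    pvInv (l ++ r) = pvInv l + pvInv r + pvCrossD l r := by
  induction l with
  | nil => simp [pvInv, pvCrossD]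
  | cons x l ih =>
    simp only [List.cons_append, pvInv, pvCrossD, List.map_cons, List.sum_cons,
      List.countP_append] at *
    push_cast
    omega

lemma pvCross_perm {l l' r r' : List Int} (hl : l.Perm l') (hr : r.Perm r') :
    pvCross l r = pvCross l' r' := by
  unfold pvCross
  have h1 : ∀ y : Int, ((l.countP (fun x => decide (y < x)) : Nat) : Int)
      = ((l'.countP (fun x => decide (y < x)) : Nat) : Int) := by
    intro y; rw [hl.countP_eq]
  calc (r.map (fun y => ((l.countP (fun x => decide (y < x)) : Nat) : Int))).sum
      = (r.map (fun y => ((l'.countP (fun x => decide (y < x)) : Nat) : Int))).sum := by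
        simp only [h1]
    _ = (r'.map (fun y => ((l'.countP (fun x => decide (y < x)) : Nat) : Int))).sum :=
        (hr.map _).sum_eq

lemma pvMerge_spec : ∀ (l r : List Int), l.Pairwise (· ≤ ·) → r.Pairwise (· ≤ ·) →
    (pvMerge l r).1.Perm (l ++ r) ∧ (pvMerge l r).1.Pairwise (· ≤ ·) ∧
      (pvMerge l r).2 = pvCross l r := by
  intro l r
  induction l, r using pvMerge.induct with
  | case1 right => intro _ hr; simp [pvMerge, pvCross, hr]
  | case2 x l => intro hl _; simpa [pvMerge, pvCross] using hl
  | case3 x l y r hxy ih =>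
    intro hl hr
    have ⟨ihp, ihs, ihc⟩ := ih (List.Pairwise.of_cons hl) hr
    rw [pvMerge]
    simp only [if_pos hxy]
    refine ⟨ihp.cons x, ?_, ?_⟩
    · refine List.pairwise_cons.mpr ⟨?_, ihs⟩
      intro z hz
      have hz' : z ∈ l ++ y :: r := ihp.mem_iff.mp hz
      rcases List.mem_append.mp hz' with h | h
      · exact (List.pairwise_cons.mp hl).1 z h
      · rcases List.mem_cons.mp h with rfl | h
        · exact hxy
        · exact le_trans hxy ((List.pairwise_cons.mp hr).1 z h)
    · -- counts: no element of y :: r is below x, so the x-column is empty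
      rw [ihc]
      unfold pvCross
      congr 1
      apply List.map_congr_left
      intro z hz
      have hyz : y ≤ z := by
        rcases List.mem_cons.mp hz with rfl | h
        · exact le_rfl
        · exact (List.pairwise_cons.mp hr).1 z h
      rw [List.countP_cons]
      have : ¬ (z < x) := by omega
      simp [this]
  | case4 x l y r hxy ih =>
    intro hl hr
    have ⟨ihp, ihs, ihc⟩ := ih hl (List.Pairwise.of_cons hr)
    rw [pvMerge]
    simp only [if_neg hxy]
    refine ⟨(ihp.cons y).trans List.perm_middle.symm, ?_, ?_⟩
    · refine List.pairwise_cons.mpr ⟨?_, ihs⟩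
      intro z hz
      have hz' : z ∈ (x :: l) ++ r := ihp.mem_iff.mp hz
      rcases List.mem_append.mp hz' with h | h
      · rcases List.mem_cons.mp h with rfl | h
        · omega
        · have := (List.pairwise_cons.mp hl).1 z h; omega
      · exact (List.pairwise_cons.mp hr).1 z h
    · -- counts: y is below every element of x :: l, a full column
      rw [ihc]
      unfold pvCross
      simp only [List.map_cons, List.sum_cons]
      have hcnt : ((x :: l).countP (fun z => decide (y < z))) = (x :: l).length := by
        apply List.countP_eq_length.mpr
        intro z hz
        rcases List.mem_cons.mp hz with rfl | h
        · simpa using (by omega : y < z)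
        · have := (List.pairwise_cons.mp hl).1 z h
          simpa using (by omega : y < z)
      rw [hcnt]
      ring

lemma pvSortCount_spec (a : List Int) :
    (pvSortCount a).1.Perm a ∧ (pvSortCount a).1.Pairwise (· ≤ ·) ∧
      (pvSortCount a).2 = pvInv a := by
  induction a using pvSortCount.induct with
  | case1 a h =>
    rw [pvSortCount, dif_pos h]
    refine ⟨List.Perm.refl a, ?_, ?_⟩
    · match a, h with
      | [], _ => simp
      | [x], _ => simp
    · match a, h with
      | [], _ => simp [pvInv]
      | [x], _ => simp [pvInv]
  | case2 a h m hpl hpr =>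
    rw [pvSortCount, dif_neg h]
    simp only []
    obtain ⟨plp, pls, plc⟩ := hpl
    obtain ⟨prp, prs, prc⟩ := hpr
    obtain ⟨mp, ms, mc⟩ :=
      pvMerge_spec (pvSortCount (a.take m)).1 (pvSortCount (a.drop m)).1 pls prs
    have hsplit : a.take m ++ a.drop m = a := List.take_append_drop m a
    refine ⟨mp.trans ((plp.append prp).trans (by rw [hsplit])), ms, ?_⟩
    rw [mc, plc, prc, pvCross_perm plp prp, pvCross_eq_pvCrossD, ← hsplit, pvInv_append]
    ring_nf
    rw [hsplit]

lemma pvBChaos_aux : ∀ (q : List Int) (k : Nat),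
    (∀ i < q.length, q.getD i 0 - (((k + i : Nat) : Int) + 1) ≤ 2) → pvBChaos k q = false := by
  intro q
  induction q with
  | nil => intro k _; rfl
  | cons v rest ih =>
    intro k h
    have h0 := h 0 (by simp)
    rw [pvBChaos]
    have : ¬ (v - ((k : Int) + 1) > 2) := by simpa using h0
    rw [if_neg this]
    apply ih
    intro i hi
    have := h (i + 1) (by simpa using hi)
    simp only [List.getD_cons_succ] at this ⊢
    push_cast at this ⊢
    omega

lemma pvBChaos_false (q : List Int) (h : Pre_minimumBribes q) : pvBChaos 0 q = false := by
  apply pvBChaos_aux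
  intro i hi
  simpa using h i hi

-- pyRange over natural bounds is a mapped range'
lemma pyRange_natCast' : ∀ (n a : Nat),
    PySem.List.pyRange (a : Int) ((a + n : Nat) : Int)
      = List.map (fun i : Nat => (i : Int)) (List.range' a n) := by
  intro n
  induction n with
  | zero => intro a; simp [pysem]
  | succ n ih =>
    intro a
    rw [PySem.List.pyRange_one_cons (by push_cast; omega)]
    have : ((a : Int) + 1) = ((a + 1 : Nat) : Int) := by push_cast; ring
    rw [this]
    have h2 : ((a + (n + 1) : Nat) : Int) = (((a + 1) + n : Nat) : Int) := by push_cast; ring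
    rw [h2, ih (a + 1)]
    simp [List.range'_succ]

lemma pyRange_natCast (a b : Nat) :
    PySem.List.pyRange (a : Int) (b : Int)
      = List.map (fun i : Nat => (i : Int)) (List.range' a (b - a)) := by
  by_cases h : a ≤ b
  · rw [show (b : Int) = ((a + (b - a) : Nat) : Int) by push_cast; omega,
      pyRange_natCast' (b - a) a]
  · have h1 : (List.range' a (b - a)) = [] := by
      have : b - a = 0 := by omega
      simp [this]
    rw [h1, List.map_nil]
    apply List.eq_nil_iff_forall_not_mem.mpr
    intro x hx
    have := PySem.List.mem_pyRange_one.mp hx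
    omega

-- count over positions equals count over elements
lemma countP_range_getD (xs : List Int) (p : Int → Bool) :
    (List.range xs.length).countP (fun i => p (xs.getD i 0)) = xs.countP p := by
  induction xs with
  | nil => simp
  | cons x xs ih =>
    rw [List.length_cons, List.range_succ_eq_map, List.countP_cons, List.countP_map,
      List.countP_cons]
    have : ((fun i => p ((x :: xs).getD i 0)) ∘ Nat.succ) = (fun i => p (xs.getD i 0)) := by
      funext i; simp
    rw [this, ih]
    simp

-- the inner loop: under Pre_, the bounded window counts exactly the inversions ending at k
lemma pvAInner_spec (q : List Int) (hq : Pre_minimumBribes q) (k : Nat) (hk : k < q.length)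
    (t : Int) :
    ((PySem.List.pyRange (max 0 (q.getD k 0 - 2)) (k : Int) 1).foldl
        (fun total j => if PySem.List.pyGetD q j 0 > q.getD k 0 then total + 1 else total) t)
      = t + (((List.range k).countP (fun j => decide (q.getD k 0 < q.getD j 0)) : Nat) : Int) := by
  set v := q.getD k 0 with hv
  set l0 : Nat := (max 0 (v - 2)).toNat with hl0
  have hcast : (max 0 (v - 2)) = (l0 : Int) := by rw [hl0]; omega
  have hfn : (fun (total : Int) (j : Int) =>
        if PySem.List.pyGetD q j 0 > v then total + 1 else total)
      = (fun total j =>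
        if (decide (PySem.List.pyGetD q j 0 > v)) = true then total + 1 else total) := by
    funext total j; simp
  rw [hcast, pyRange_natCast l0 k, hfn, PySem.List.foldl_count_if, List.countP_map]
  congr 1
  have hpred : ((fun j => decide (PySem.List.pyGetD q j 0 > v)) ∘ (fun i : Nat => (i : Int)))
      = (fun j : Nat => decide (v < q.getD j 0)) := by
    funext j
    simp [PySem.List.pyGetD_natCast]
  rw [hpred]
  -- positions below the window never contribute: q[j] ≤ j+3 ≤ v there
  have hpre0 : ∀ j, j < l0 → j < q.length → ¬ (v < q.getD j 0) := by
    intro j hj hjl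
    have hj' : (j : Int) < max 0 (v - 2) := by rw [hcast]; exact_mod_cast hj
    have hj2 : (j : Int) < v - 2 := by omega
    have := hq j hjl
    omega
  by_cases h : l0 ≤ k
  · have hsplit : List.range k = List.range' 0 l0 ++ List.range' l0 (k - l0) := by
      rw [List.range_eq_range']
      have hap := List.range'_append (s := 0) (m := l0) (n := k - l0) (step := 1)
      simp only [Nat.zero_add, Nat.one_mul] at hap
      rw [hap, show l0 + (k - l0) = k by omega]
    rw [hsplit, List.countP_append]
    have hzero : (List.range' 0 l0).countP (fun j : Nat => decide (v < q.getD j 0)) = 0 := by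
      apply List.countP_eq_zero.mpr
      intro j hj
      have hj' : j < l0 := by
        have := List.mem_range'_1.mp hj
        omega
      simpa using hpre0 j hj' (by omega)
    omega
  · have h1 : k - l0 = 0 := by omega
    rw [h1]
    simp only [List.range'_zero, List.countP_nil]
    have hz : (List.range k).countP (fun j : Nat => decide (v < q.getD j 0)) = 0 := by
      apply List.countP_eq_zero.mpr
      intro j hj
      have hj' : j < k := List.mem_range.mp hj
      simpa using hpre0 j (by omega) (by omega)
    exact_mod_cast hz.symm

-- the outer countdown accumulates those per-index counts
lemma pvAOuter_spec (q : List Int) (h : Pre_minimumBribes q) :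
    ∀ k, k ≤ q.length → ∀ t, pvAOuter q k t =
      t + (((List.range k).map (fun i =>
        (((List.range i).countP (fun j => decide (q.getD i 0 < q.getD j 0)) : Nat) : Int))).sum) := by
  intro k
  induction k with
  | zero => intro _ t; simp [pvAOuter]
  | succ k ih =>
    intro hk t
    rw [pvAOuter]
    have hkl : k < q.length := by omega
    have hget : PySem.List.pyGetD q (k : Int) 0 = q.getD k 0 := PySem.List.pyGetD_natCast q k 0
    have hnc : ¬ (PySem.List.pyGetD q (k : Int) 0 - ((k : Int) + 1) > 2) := by
      rw [hget]
      have := h k hkl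
      omega
    rw [if_neg hnc]
    simp only [hget]
    rw [pvAInner_spec q h k hkl t, ih (by omega), List.range_succ, List.map_append,
      List.sum_append]
    simp
    ring

-- the accumulated counts are exactly the inversion count
lemma sum_counts_eq_pvInv (q : List Int) :
    (((List.range q.length).map (fun i =>
        (((List.range i).countP (fun j => decide (q.getD i 0 < q.getD j 0)) : Nat) : Int))).sum)
      = pvInv q := by
  induction q with
  | nil => simp [pvInv]
  | cons x xs ih =>
    rw [List.length_cons, List.range_succ_eq_map, List.map_cons, List.sum_cons, List.map_map]
    have hf : ((fun i =>
          ((((List.range i).countP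
            (fun j => decide ((x :: xs).getD i 0 < (x :: xs).getD j 0)) : Nat)) : Int))
            ∘ Nat.succ)
        = (fun i : Nat =>
          (((List.range i).countP (fun j => decide (xs.getD i 0 < xs.getD j 0)) : Nat) : Int)
            + (if (fun i : Nat => decide (xs.getD i 0 < x)) i = true then (1:Int) else 0)) := by
      funext i
      simp only [Function.comp_apply, List.getD_cons_succ]
      rw [List.range_succ_eq_map, List.countP_cons, List.countP_map]
      have : ((fun j => decide (xs.getD i 0 < (x :: xs).getD j 0)) ∘ Nat.succ)
          = (fun j : Nat => decide (xs.getD i 0 < xs.getD j 0)) := by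
        funext j; simp
      rw [this]
      simp only [List.getD_cons_zero]
      by_cases h : xs.getD i 0 < x <;> simp
    rw [hf, PySem.List.sum_map_add_int, PySem.List.sum_map_ite_one_zero, ih,
      countP_range_getD xs (fun y => decide (y < x))]
    simp [pvInv]
    ring

-- ===== VERDICT (by name: the statement is the Claim_ definition above) =====
theorem minimumBribes_spec : Claim_equal_minimumBribes := by
  intro q _ hpre
  unfold Spec_minimumBribes minimumBribes minimumBribes_alt
  rw [pvBChaos_false q hpre, pvAOuter_spec q hpre q.length le_rfl 0,
    sum_counts_eq_pvInv q, (pvSortCount_spec q).2.2]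
  simp
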